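-- pv_equiv track=rewrite | github.com/jasper-sinclair/kobra-train | convert_to_sparse.py | extract_indices
-- ===== SOURCE A (Python) =====
-- WHITE = 0
--
-- BLACK = 1
--
-- PIECE_TO_INDEX = {
--     "P": 0,
--     "N": 1,
--     "B": 2,
--     "R": 3,
--     "Q": 4,
--     "K": 5,
--     "p": 0,
--     "n": 1,
--     "b": 2,
--     "r": 3,
--     "q": 4,
--     "k": 5,
-- }
--
-- def extract_indices(fen, perspective):
--     """
--     Extract active NNUE feature indices from a FEN string.
--
--     Features are encoded relative to a given perspective:
--         - Own pieces occupy first 384 indices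
--         - Opponent pieces occupy second 384 indices
--         - Board is vertically flipped for black perspective
--
--     Returns:
--         List of active feature indices (sparse representation).
--     """
--
--     board_part = fen.split()[0]
--     indices = []
--
--     rank = 7
--     file = 0
--
--     for c in board_part:
--         # Move to next rank
--         if c == "/":
--             rank -= 1
--             file = 0
--             continue
--
--         # Skip empty squares
--         if c.isdigit():
--             file += int(c)
--             continue
--
--         # Skip unsupported symbols
--         if c not in PIECE_TO_INDEX:
--             file += 1
--             continue
--
--         # Convert (rank, file) into square index 0–63
--         sq = rank * 8 + file
--
--         piece_type = PIECE_TO_INDEX[c]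
--         piece_color = WHITE if c.isupper() else BLACK
--
--         # Determine whether piece belongs to perspective side
--         index_color = 1 if piece_color != perspective else 0
--
-- 	   # Flip board vertically for black perspective
--         relative_sq = sq if perspective == WHITE else (sq ^ 56)
--
--         # Compute final 0–767 feature index
--         idx = 384 * index_color + 64 * piece_type + relative_sq
--         indices.append(idx)
--
--         file += 1
--
--     return indices
-- ===== SOURCE B (Python) =====
-- WHITE = 0
-- BLACK = 1
--
-- PIECE_TO_INDEX = {
--     "P": 0, "N": 1, "B": 2, "R": 3, "Q": 4, "K": 5,
--     "p": 0, "n": 1, "b": 2, "r": 3, "q": 4, "k": 5,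
-- }
--
--
-- def extract_indices(fen, perspective):
--     """Extract active NNUE feature indices from a FEN string.
--
--     Stateless per-piece computation: no running rank/file counters are
--     threaded through the scan; for each piece character the rank is
--     recovered by counting '/' in the prefix and the file by summing the
--     square-advances of the current rank segment of the prefix.
--     """
--     board = fen.split()[0]
--     indices = []
--     for i, c in enumerate(board):
--         if c not in PIECE_TO_INDEX:
--             continue
--         prefix = board[:i]
--         rank = 7 - prefix.count("/")
--         file = sum(int(d) if d.isdigit() else 1 for d in prefix.split("/")[-1])
--         sq = rank * 8 + file
--         index_color = 0 if (WHITE if c.isupper() else BLACK) == perspective else 1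
--         relative_sq = sq if perspective == WHITE else sq ^ 56
--         indices.append(384 * index_color + 64 * PIECE_TO_INDEX[c] + relative_sq)
--     return indices
-- ===== Notes on version B (the rewrite author's own statement) =====
-- stated objective: alternative
-- what changed: Replaces A's single scan threading mutable rank/file counters across the string with a stateless per-piece computation: for each piece character, rank is recovered by counting '/' in the prefix and file by summing the advances of the prefix's last rank segment (prefix.split('/')[-1]); this trades A's O(n) running-state machine for an O(n^2) state-free one.
import Mathlib
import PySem

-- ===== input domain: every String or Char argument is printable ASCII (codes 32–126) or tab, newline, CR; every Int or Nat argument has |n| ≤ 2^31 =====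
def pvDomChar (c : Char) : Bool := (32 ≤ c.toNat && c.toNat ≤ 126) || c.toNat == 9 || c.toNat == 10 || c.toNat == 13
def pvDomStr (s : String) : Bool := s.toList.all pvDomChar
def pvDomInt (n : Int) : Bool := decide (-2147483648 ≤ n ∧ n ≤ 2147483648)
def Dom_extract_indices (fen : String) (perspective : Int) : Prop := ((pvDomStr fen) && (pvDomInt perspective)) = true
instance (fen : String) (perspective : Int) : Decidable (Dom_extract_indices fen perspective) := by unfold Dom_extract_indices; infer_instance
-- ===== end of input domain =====

-- B replaces A's single scan threading mutable rank/file counters with a stateless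
-- per-piece computation: for each piece character the rank is recovered by counting '/'
-- in the prefix and the file by summing the advances of the prefix's last rank segment
-- (objective: alternative decomposition, no speed claim).

-- ===== PORT A =====
-- module constant PIECE_TO_INDEX (keys are single-character strings, ported as Char keys)
def pieceToIndex : PySem.Dict Char Int :=
  PySem.Dict.mk [('P', 0), ('N', 1), ('B', 2), ('R', 3), ('Q', 4), ('K', 5),
                 ('p', 0), ('n', 1), ('b', 2), ('r', 3), ('q', 4), ('k', 5)]

-- the body of A's single for-loop; state = (rank, file, indices)
def aStep (perspective : Int) (st : Int × Int × List Int) (c : Char) : Int × Int × List Int :=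
  let rank := st.1
  let file := st.2.1
  let indices := st.2.2
  if c = '/' then (rank - 1, 0, indices)
  else if PySem.Chars.isdigit c then
    (rank, file + (PySem.Int.ofChars? [c]).getD 0, indices)  -- int(c); c is a digit here, so ofChars? is some
  else match pieceToIndex.get? c with
    | none => (rank, file + 1, indices)
    | some piece_type =>
        let sq := rank * 8 + file
        let piece_color : Int := if PySem.Chars.isupper c then 0 else 1
        let index_color : Int := if piece_color ≠ perspective then 1 else 0
        let relative_sq := if perspective = 0 then sq else PySem.Int.bxor sq 56
        (rank, file + 1, indices ++ [384 * index_color + 64 * piece_type + relative_sq])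

def extract_indices (fen : String) (perspective : Int) : List Int :=
  let board_part := (PySem.Chars.split₀ fen.toList).headD []  -- fen.split()[0]; Pre_ guarantees the list is nonempty
  (board_part.foldl (aStep perspective) (7, 0, [])).2.2

-- ===== PORT B =====
-- int(d) if d.isdigit() else 1 — the advance one character contributes to the file counter
def bAdv (d : Char) : Int :=
  if PySem.Chars.isdigit d then (PySem.Int.ofChars? [d]).getD 0 else 1

-- sum(int(d) if d.isdigit() else 1 for d in seg)
def bFile (seg : List Char) : Int := seg.foldl (fun s d => s + bAdv d) 0

-- the body of Source B's for-loop over enumerate(board); pr = (i, c)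
def bStep (perspective : Int) (board : List Char) (indices : List Int) (pr : Int × Char) : List Int :=
  match pieceToIndex.get? pr.2 with
  | none => indices  -- 'continue' for characters not in PIECE_TO_INDEX
  | some pt =>
      let pre := PySem.List.slice board (some 0) (some pr.1)  -- board[:i]
      let rank : Int := 7 - (pre.count '/' : Int)             -- 7 - prefix.count("/")
      -- prefix.split("/")[-1] : single-character separator, exact as List.splitOn;
      -- split always returns a nonempty list, so [-1] is getLastD
      let file := bFile ((List.splitOn '/' pre).getLastD [])
      let sq := rank * 8 + file
      let piece_color : Int := if PySem.Chars.isupper pr.2 then 0 else 1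
      let index_color : Int := if piece_color = perspective then 0 else 1
      let relative_sq := if perspective = 0 then sq else PySem.Int.bxor sq 56
      indices ++ [384 * index_color + 64 * pt + relative_sq]

def extract_indices_alt (fen : String) (perspective : Int) : List Int :=
  let board := (PySem.Chars.split₀ fen.toList).headD []  -- fen.split()[0]
  (PySem.List.enumerate board).foldl (bStep perspective board) []

-- ===== PRECONDITION & SPEC =====
-- Pre_ excludes whitespace-only fen (fen.split() == []), on which A's fen.split()[0] raises IndexError (B raises there too).
def Pre_extract_indices (fen : String) (perspective : Int) : Prop :=
  PySem.Chars.split₀ fen.toList ≠ []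
instance (fen : String) (perspective : Int) : Decidable (Pre_extract_indices fen perspective) := by
  unfold Pre_extract_indices; infer_instance

def pvWitness_extract_indices : String × Int := ("rnbq1k2/8/8/8 b", 1)

def Spec_extract_indices (fen : String) (perspective : Int) (out : List Int) : Prop := out = extract_indices_alt fen perspective
instance (fen : String) (perspective : Int) (out : List Int) : Decidable (Spec_extract_indices fen perspective out) := by unfold Spec_extract_indices; infer_instance

-- ===== CLAIM (what is proved, stated in full; the proofs are below) =====
def Claim_equal_extract_indices : Prop := ∀ (fen : String) (perspective : Int), Dom_extract_indices fen perspective → Pre_extract_indices fen perspective → Spec_extract_indices fen perspective (extract_indices fen perspective)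

-- ===== LEMMAS AND PROOFS =====

-- the feature index appended for one piece (shared spine vocabulary)
def pieceIdx (p rank file pt : Int) (c : Char) : Int :=
  let sq := rank * 8 + file
  let piece_color : Int := if PySem.Chars.isupper c then 0 else 1
  let index_color : Int := if piece_color = p then 0 else 1
  let relative_sq := if p = 0 then sq else PySem.Int.bxor sq 56
  384 * index_color + 64 * pt + relative_sq

-- common recursive spine: the indices produced from chars cs starting at (rank, file)
def seg (p rank file : Int) : List Char → List Int
  | [] => []
  | c :: cs =>
    if c = '/' then seg p (rank - 1) 0 cs
    else if PySem.Chars.isdigit c then seg p rank (file + (PySem.Int.ofChars? [c]).getD 0) cs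
    else match pieceToIndex.get? c with
      | none => seg p rank (file + 1) cs
      | some pt => pieceIdx p rank file pt c :: seg p rank (file + 1) cs

lemma aFold_eq_seg (p : Int) (cs : List Char) : ∀ (rank file : Int) (acc : List Int),
    (cs.foldl (aStep p) (rank, file, acc)).2.2 = acc ++ seg p rank file cs := by
  induction cs with
  | nil => intro rank file acc; simp [seg]
  | cons c cs ih =>
    intro rank file acc
    by_cases hsl : c = '/'
    · simp [List.foldl_cons, aStep, seg, hsl, ih]
    · by_cases hd : PySem.Chars.isdigit c
      · simp [List.foldl_cons, aStep, seg, hsl, hd, ih]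
      · cases hget : pieceToIndex.get? c with
        | none => simp [List.foldl_cons, aStep, seg, hsl, hd, hget, ih]
        | some pt =>
          by_cases hc : ((if PySem.Chars.isupper c then (0:Int) else 1) = p) <;>
            simp [List.foldl_cons, aStep, seg, hsl, hd, hget, ih, pieceIdx, hc]

-- keys of the piece table are neither digits nor '/'
lemma get?_some_key (c : Char) (pt : Int) (h : pieceToIndex.get? c = some pt) :
    PySem.Chars.isdigit c = false ∧ c ≠ '/' := by
  by_cases h1 : c = 'P'; · subst h1; decide
  by_cases h2 : c = 'N'; · subst h2; decide
  by_cases h3 : c = 'B'; · subst h3; decide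
  by_cases h4 : c = 'R'; · subst h4; decide
  by_cases h5 : c = 'Q'; · subst h5; decide
  by_cases h6 : c = 'K'; · subst h6; decide
  by_cases h7 : c = 'p'; · subst h7; decide
  by_cases h8 : c = 'n'; · subst h8; decide
  by_cases h9 : c = 'b'; · subst h9; decide
  by_cases h10 : c = 'r'; · subst h10; decide
  by_cases h11 : c = 'q'; · subst h11; decide
  by_cases h12 : c = 'k'; · subst h12; decide
  exfalso
  simp only [pieceToIndex, PySem.Dict.get?_mk_cons,
    beq_eq_false_iff_ne.mpr (Ne.symm h1), beq_eq_false_iff_ne.mpr (Ne.symm h2),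
    beq_eq_false_iff_ne.mpr (Ne.symm h3), beq_eq_false_iff_ne.mpr (Ne.symm h4),
    beq_eq_false_iff_ne.mpr (Ne.symm h5), beq_eq_false_iff_ne.mpr (Ne.symm h6),
    beq_eq_false_iff_ne.mpr (Ne.symm h7), beq_eq_false_iff_ne.mpr (Ne.symm h8),
    beq_eq_false_iff_ne.mpr (Ne.symm h9), beq_eq_false_iff_ne.mpr (Ne.symm h10),
    beq_eq_false_iff_ne.mpr (Ne.symm h11), beq_eq_false_iff_ne.mpr (Ne.symm h12),
    Bool.false_eq_true, if_false] at h
  simp [PySem.Dict.get?] at h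

lemma splitOn_ne_nil (cs : List Char) : List.splitOn '/' cs ≠ [] := by
  simp only [List.splitOn]
  induction cs with
  | nil => simp [List.splitOnP_nil]
  | cons c cs ih =>
    rw [List.splitOnP_cons]
    split
    · simp
    · cases h : List.splitOnP (fun x => x == '/') cs with
      | nil => exact absurd h ih
      | cons a b => simp

-- appending a '/' closes the last component and opens an empty one
lemma splitOn_concat_slash (q : List Char) :
    List.splitOn '/' (q ++ ['/']) = List.splitOn '/' q ++ [[]] := by
  simp only [List.splitOn]
  induction q with
  | nil => decide
  | cons x xs ih =>
    rw [List.cons_append, List.splitOnP_cons, List.splitOnP_cons]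
    by_cases hx : x = '/'
    · simp [hx, ih]
    · cases h : List.splitOnP (fun c => c == '/') xs with
      | nil =>
        exact absurd h (by simpa [List.splitOn] using splitOn_ne_nil xs)
      | cons a b =>
        rw [h] at ih
        simp [hx, ih]

-- appending a non-'/' character extends the last component
lemma splitOnP_concat (c : Char) (hc : (c == '/') = false) (xs : List Char) :
    ∃ init last, List.splitOnP (fun a => a == '/') xs = init ++ [last] ∧
      List.splitOnP (fun a => a == '/') (xs ++ [c]) = init ++ [last ++ [c]] := by
  induction xs with
  | nil =>
    exact ⟨[], [], by simp [List.splitOnP_nil],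
      by simp [List.splitOnP_cons, List.splitOnP_nil, hc]⟩
  | cons x xs ih =>
    obtain ⟨init, last, h1, h2⟩ := ih
    by_cases hx : (x == '/') = true
    · exact ⟨[] :: init, last, by simp [List.splitOnP_cons, hx, h1],
        by simp [List.splitOnP_cons, hx, h2]⟩
    · cases init with
      | nil =>
        exact ⟨[], x :: last, by simp [List.splitOnP_cons, hx, h1],
          by simp [List.splitOnP_cons, hx, h2]⟩
      | cons i0 is =>
        exact ⟨(x :: i0) :: is, last, by simp [List.splitOnP_cons, hx, h1],
          by simp [List.splitOnP_cons, hx, h2]⟩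

lemma getLastD_splitOn_concat (q : List Char) (c : Char) (hc : c ≠ '/') :
    (List.splitOn '/' (q ++ [c])).getLastD [] = (List.splitOn '/' q).getLastD [] ++ [c] := by
  obtain ⟨init, last, h1, h2⟩ := splitOnP_concat c (by simpa using hc) q
  simp [List.splitOn, h1, h2]

lemma bFile_concat (xs : List Char) (c : Char) :
    bFile (xs ++ [c]) = bFile xs + bAdv c := by
  simp only [bFile, List.foldl_append, List.foldl_cons, List.foldl_nil]

lemma bFold_eq_seg (p : Int) (board : List Char) : ∀ (cs q : List Char) (acc : List Int),
    board = q ++ cs →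
    (PySem.List.enumerate cs (q.length : Int)).foldl (bStep p board) acc
      = acc ++ seg p (7 - (q.count '/' : Int)) (bFile ((List.splitOn '/' q).getLastD [])) cs := by
  intro cs
  induction cs with
  | nil => intro q acc _; simp [PySem.List.enumerate, seg]
  | cons c cs ih =>
    intro q acc hb
    rw [PySem.List.enumerate_cons, List.foldl_cons]
    have hq1 : ((q ++ [c]).length : Int) = (q.length : Int) + 1 := by simp
    have hb' : board = (q ++ [c]) ++ cs := by simpa using hb
    have hpre : PySem.List.slice board (some 0) (some (q.length : Int)) = q := by
      rw [hb]
      simp only [PySem.List.slice_zero_start, PySem.List.slice_to_natCast]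
      exact List.take_left
    cases hget : pieceToIndex.get? c with
    | none =>
      have hstep : bStep p board acc ((q.length : Int), c) = acc := by
        simp [bStep, hget]
      rw [hstep]
      by_cases hsl : c = '/'
      · subst hsl
        have := ih (q ++ ['/']) acc hb'
        rw [hq1] at this
        rw [this, splitOn_concat_slash]
        simp [seg, bFile, List.count_append]
        ring_nf
      · by_cases hd : PySem.Chars.isdigit c
        · have := ih (q ++ [c]) acc hb'
          rw [hq1] at this
          rw [this, getLastD_splitOn_concat q c hsl, bFile_concat]
          simp [seg, hsl, hd, bAdv, List.count_append]
        · have := ih (q ++ [c]) acc hb'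
          rw [hq1] at this
          rw [this, getLastD_splitOn_concat q c hsl, bFile_concat]
          simp [seg, hsl, hd, hget, bAdv, List.count_append]
    | some pt =>
      obtain ⟨hd, hsl⟩ := get?_some_key c pt hget
      have hstep : bStep p board acc ((q.length : Int), c)
          = acc ++ [pieceIdx p (7 - (q.count '/' : Int))
              (bFile ((List.splitOn '/' q).getLastD [])) pt c] := by
        simp [bStep, hget, hpre, pieceIdx]
      rw [hstep]
      have := ih (q ++ [c]) (acc ++ [pieceIdx p (7 - (q.count '/' : Int))
          (bFile ((List.splitOn '/' q).getLastD [])) pt c]) hb'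
      rw [hq1] at this
      rw [this, getLastD_splitOn_concat q c hsl, bFile_concat]
      simp [seg, hsl, hd, hget, bAdv, List.count_append]

-- ===== VERDICT (by name: the statement is the Claim_ definition above) =====
theorem extract_indices_spec : Claim_equal_extract_indices := by
  intro fen p _hdom _hpre
  unfold Spec_extract_indices extract_indices extract_indices_alt
  rw [aFold_eq_seg]
  have := bFold_eq_seg p ((PySem.Chars.split₀ fen.toList).headD [])
    ((PySem.Chars.split₀ fen.toList).headD []) [] [] (by simp)
  simpa [List.splitOn, List.splitOnP_nil] using this.symm
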